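-- pv_equiv track=rewrite | github.com/Holyblitz/Sysiphe-v2 | guess/sysiphe_guess_verify_email.py | pick_best_email
-- ===== SOURCE A (Python) =====
-- def pick_best_email(emails):
--     if not emails:
--         return None
--     preferred = ("contact@", "info@", "hello@", "enquiries@", "enquiry@", "sales@", "support@", "admin@")
--     for p in preferred:
--         for e in emails:
--             if e.startswith(p):
--                 return e
--     return emails[0]
-- ===== SOURCE B (Python) =====
-- def pick_best_email(emails):
--     priority = {
--         "contact@": 0, "info@": 1, "hello@": 2, "enquiries@": 3,
--         "enquiry@": 4, "sales@": 5, "support@": 6, "admin@": 7,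
--     }
--     no_match = len(priority)
--     best, best_rank = None, no_match + 1
--     for e in emails:
--         r = next((i for p, i in priority.items() if e.startswith(p)), no_match)
--         if r < best_rank:
--             best, best_rank = e, r
--     return best
-- ===== Notes on version B (the rewrite author's own statement) =====
-- stated objective: alternative
-- what changed: Replaces A's per-prefix rescans of the email list (outer loop over 8 prefixes, inner loop over emails, early return, separate empty guard and emails[0] fallback) by a prefix-to-rank dict and one single pass over the emails tracking the strictly minimal rank seen so far, starting from a None best with sentinel rank 9 so the empty case and the first-email fallback need no special code.
import Mathlib
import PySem

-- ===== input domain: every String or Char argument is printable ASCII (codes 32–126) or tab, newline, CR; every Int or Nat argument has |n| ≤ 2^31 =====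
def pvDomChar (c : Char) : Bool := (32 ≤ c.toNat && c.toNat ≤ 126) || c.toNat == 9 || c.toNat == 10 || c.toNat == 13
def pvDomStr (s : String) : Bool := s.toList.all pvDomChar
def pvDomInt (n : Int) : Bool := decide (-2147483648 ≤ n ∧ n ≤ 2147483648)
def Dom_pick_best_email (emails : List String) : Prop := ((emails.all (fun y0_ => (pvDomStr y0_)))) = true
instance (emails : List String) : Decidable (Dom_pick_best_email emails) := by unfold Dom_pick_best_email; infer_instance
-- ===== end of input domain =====

-- B replaces A's per-prefix rescans of the email list by a single pass tracking the minimum prefix-rank (alternative decomposition; same asymptotic cost).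


-- ===== PORT A =====
-- the tuple of preferred prefixes, shared by both Pythons
def pvPreferred : List String :=
  ["contact@", "info@", "hello@", "enquiries@", "enquiry@", "sales@", "support@", "admin@"]

-- A's inner loop: first email starting with p (early return)
def pvFirstWith (p : String) : List String → Option String
  | [] => none
  | e :: rest => if PySem.Str.startswith e p then some e else pvFirstWith p rest

-- A's outer loop over the prefixes (early return on a match)
def pvLoopA (emails : List String) : List String → Option String
  | [] => none
  | p :: rest =>
    match pvFirstWith p emails with
    | some e => some e
    | none => pvLoopA emails rest

def pick_best_email (emails : List String) : Option String :=
  match emails with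
  | [] => none
  | e0 :: _ =>
    match pvLoopA emails pvPreferred with
    | some e => some e
    | none => some e0

-- ===== PORT B =====
-- B's priority dict as an association list (prefix, rank)
def pvPriority : List (String × Nat) :=
  [("contact@", 0), ("info@", 1), ("hello@", 2), ("enquiries@", 3),
   ("enquiry@", 4), ("sales@", 5), ("support@", 6), ("admin@", 7)]

-- B's rank: the generator 'next((i for p, i in priority.items() if e.startswith(p)), no_match)'
def pvRankD (e : String) : List (String × Nat) → Nat → Nat
  | [], noMatch => noMatch
  | (p, i) :: rest, noMatch => if PySem.Str.startswith e p then i else pvRankD e rest noMatch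

-- B's single pass: keep the earliest email of strictly minimal rank (best starts at None, rank sentinel 9)
def pvBestLoop2 : List String → Option String → Nat → Option String
  | [], best, _ => best
  | e :: rest, best, bestRank =>
    let r := pvRankD e pvPriority 8
    if r < bestRank then pvBestLoop2 rest (some e) r else pvBestLoop2 rest best bestRank

def pick_best_email_alt (emails : List String) : Option String :=
  pvBestLoop2 emails none 9

-- ===== PRECONDITION & SPEC =====
def Spec_pick_best_email (emails : List String) (out : Option String) : Prop := out = pick_best_email_alt emails
instance (emails : List String) (out : Option String) : Decidable (Spec_pick_best_email emails out) := by unfold Spec_pick_best_email; infer_instance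

-- ===== CLAIM (what is proved, stated in full; the proofs are below) =====
def Claim_equal_pick_best_email : Prop := ∀ (emails : List String), Dom_pick_best_email emails → Spec_pick_best_email emails (pick_best_email emails)

-- ===== LEMMAS AND PROOFS =====

-- proof-side reference versions: indexed rank over a plain prefix list, and the same
-- minimum-tracking pass with a mandatory current best (used to bridge A's loops and B's pass)
def pvRankFrom (e : String) : List String → Nat → Nat
  | [], n => n
  | p :: rest, n => if PySem.Str.startswith e p then n else pvRankFrom e rest (n + 1)

def pvBestLoop (ps : List String) : List String → String → Nat → String
  | [], best, _ => best
  | e :: rest, best, bestRank =>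
    let r := pvRankFrom e ps 0
    if r < bestRank then pvBestLoop ps rest e r else pvBestLoop ps rest best bestRank

-- rank accumulator shift
theorem pvRankFrom_succ (e : String) (ps : List String) (n : Nat) :
    pvRankFrom e ps (n + 1) = pvRankFrom e ps n + 1 := by
  induction ps generalizing n with
  | nil => simp [pvRankFrom]
  | cons p rest ih =>
    simp only [pvRankFrom]
    split_ifs with h
    · rfl
    · exact ih (n + 1)

-- once the best has rank 0 it is never replaced
theorem pvBestLoop_zero (ps es : List String) (b : String) :
    pvBestLoop ps es b 0 = b := by
  induction es with
  | nil => rfl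
  | cons e rest ih => simp [pvBestLoop, ih]

-- if some email in es starts with p and the current best rank is positive,
-- the loop with prefixes (p :: ps') returns the first such email
theorem pvBestLoop_hit (p : String) (ps' : List String) (es : List String) (e : String)
    (b : String) (rb : Nat) (hrb : 0 < rb) (h : pvFirstWith p es = some e) :
    pvBestLoop (p :: ps') es b rb = e := by
  induction es generalizing b rb with
  | nil => simp [pvFirstWith] at h
  | cons e1 rest ih =>
    rw [pvFirstWith] at h
    simp only [pvBestLoop]
    by_cases hsw : PySem.Str.startswith e1 p = true
    · rw [if_pos hsw] at h
      injection h with he; subst he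
      rw [show pvRankFrom e1 (p :: ps') 0 = 0 from by rw [pvRankFrom, if_pos hsw]]
      rw [if_pos hrb]
      exact pvBestLoop_zero _ _ _
    · rw [if_neg hsw] at h
      rw [show pvRankFrom e1 (p :: ps') 0 = pvRankFrom e1 ps' 0 + 1 from by
        rw [pvRankFrom, if_neg hsw, pvRankFrom_succ]]
      split_ifs with hlt
      · exact ih _ _ (Nat.succ_pos _) h
      · exact ih _ _ hrb h

-- if no email in es starts with p, the leading prefix just shifts every rank by one
theorem pvBestLoop_shift (p : String) (ps' : List String) (es : List String)
    (b : String) (rb : Nat) (h : pvFirstWith p es = none) :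
    pvBestLoop (p :: ps') es b (rb + 1) = pvBestLoop ps' es b rb := by
  induction es generalizing b rb with
  | nil => rfl
  | cons e1 rest ih =>
    rw [pvFirstWith] at h
    by_cases hsw : PySem.Str.startswith e1 p = true
    · rw [if_pos hsw] at h; exact absurd h (by simp)
    · rw [if_neg hsw] at h
      simp only [pvBestLoop]
      rw [show pvRankFrom e1 (p :: ps') 0 = pvRankFrom e1 ps' 0 + 1 from by
        rw [pvRankFrom, if_neg hsw, pvRankFrom_succ]]
      simp only [Nat.add_lt_add_iff_right]
      split_ifs with hlt
      · exact ih _ _ h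
      · exact ih _ _ h

-- the main correspondence, for an arbitrary prefix list
theorem pvMain (ps : List String) (e0 : String) (es : List String) :
    (match pvLoopA (e0 :: es) ps with
     | some e => some e
     | none => some e0) = some (pvBestLoop ps es e0 (pvRankFrom e0 ps 0)) := by
  induction ps with
  | nil =>
    simp only [pvLoopA, pvRankFrom]
    rw [pvBestLoop_zero]
  | cons p rest ih =>
    simp only [pvLoopA, pvFirstWith]
    by_cases hsw : PySem.Str.startswith e0 p = true
    · rw [if_pos hsw]
      rw [show pvRankFrom e0 (p :: rest) 0 = 0 from by rw [pvRankFrom, if_pos hsw]]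
      rw [pvBestLoop_zero]
    · rw [if_neg hsw]
      rw [show pvRankFrom e0 (p :: rest) 0 = pvRankFrom e0 rest 0 + 1 from by
        rw [pvRankFrom, if_neg hsw, pvRankFrom_succ]]
      cases hfw : pvFirstWith p es with
      | some e =>
        rw [pvBestLoop_hit p rest es e e0 _ (Nat.succ_pos _) hfw]
      | none =>
        rw [pvBestLoop_shift p rest es e0 _ hfw]
        exact ih

-- B's rank over the priority assoc list agrees with the plain indexed rank over the prefixes
theorem pvRankD_eq (e : String) : pvRankD e pvPriority 8 = pvRankFrom e pvPreferred 0 := by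
  simp only [pvPriority, pvPreferred, pvRankD, pvRankFrom]

-- every rank is at most 8
theorem pvRankFrom_le (e : String) (ps : List String) (n : Nat) :
    pvRankFrom e ps n ≤ n + ps.length := by
  induction ps generalizing n with
  | nil => simp [pvRankFrom]
  | cons p rest ih =>
    rw [pvRankFrom]
    split_ifs with h
    · omega
    · have := ih (n + 1)
      simp only [List.length_cons]
      omega

-- once the best is a real email, B's loop mirrors pvBestLoop
theorem pvBestLoop2_some (es : List String) (b : String) (rb : Nat) :
    pvBestLoop2 es (some b) rb = some (pvBestLoop pvPreferred es b rb) := by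
  induction es generalizing b rb with
  | nil => rfl
  | cons e rest ih =>
    simp only [pvBestLoop2, pvBestLoop, pvRankD_eq]
    split_ifs with h
    · exact ih _ _
    · exact ih _ _

-- ===== VERDICT (by name: the statement is the Claim_ definition above) =====
theorem pick_best_email_spec : Claim_equal_pick_best_email := by
  intro emails _
  unfold Spec_pick_best_email pick_best_email pick_best_email_alt
  cases emails with
  | nil => rfl
  | cons e0 es =>
    rw [show pvBestLoop2 (e0 :: es) none 9
          = pvBestLoop2 es (some e0) (pvRankFrom e0 pvPreferred 0) from by
        simp only [pvBestLoop2, pvRankD_eq]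
        rw [if_pos (by have := pvRankFrom_le e0 pvPreferred 0; have hl : pvPreferred.length = 8 := rfl; omega)]]
    rw [pvBestLoop2_some]
    exact pvMain pvPreferred e0 es
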